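-- pv_equiv track=rewrite | github.com/projectsnavadeep/reportgenerator.in | report_generator.py | _find_section_in_ai
-- ===== SOURCE A (Python) =====
-- from typing import Dict, List, Optional, Union, Tuple, Any
--
-- def _find_section_in_ai(section_name: str, sections: Dict[str, str], full_report: str) -> str:
--     """Find content for a section in AI-generated report"""
--     # Exact match
--     if section_name in sections:
--         return sections[section_name]
--
--     # Partial match
--     for ai_section, content in sections.items():
--         if section_name.lower() in ai_section.lower() or ai_section.lower() in section_name.lower():
--             return content
--
--     # Try to find in full report using keywords
--     keywords = section_name.lower().split()
--     lines = full_report.split('\n')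
--     in_section = False
--     section_content = []
--
--     for line in lines:
--         if line.startswith('## '):
--             # Check if this line contains any keywords
--             line_lower = line.lower()
--             if any(keyword in line_lower for keyword in keywords):
--                 in_section = True
--             elif in_section:
--                 break
--         elif in_section:
--             section_content.append(line)
--
--     if section_content:
--         return '\n'.join(section_content).strip()
--
--     return ""
-- ===== SOURCE B (Python) =====
-- def _find_section_in_ai(section_name: str, sections, full_report: str) -> str:
--     """Find content for a section in AI-generated report (section-parse re-implementation)."""
--     # Exact match
--     if section_name in sections:
--         return sections[section_name]
--
--     # Partial match (first item whose name overlaps, either direction)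
--     name_lower = section_name.lower()
--     hit = next((content for ai_section, content in sections.items()
--                 if name_lower in ai_section.lower() or ai_section.lower() in name_lower),
--                None)
--     if hit is not None:
--         return hit
--
--     # Keyword search: parse the report once into (header, body_lines) sections
--     keywords = name_lower.split()
--
--     secs = []
--     header, body = None, []
--     for line in full_report.split('\n'):
--         if line.startswith('## '):
--             if header is not None:
--                 secs.append((header, body))
--             header, body = line, []
--         elif header is not None:
--             body.append(line)
--     if header is not None:
--         secs.append((header, body))
--
--     def matches(h):
--         hl = h.lower()
--         return any(k in hl for k in keywords)
--
--     idx = next((i for i, (h, _) in enumerate(secs) if matches(h)), None)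
--     if idx is None:
--         return ""
--
--     collected = []
--     for h, b in secs[idx:]:
--         if not matches(h):
--             break
--         collected.extend(b)
--     return "\n".join(collected).strip()
-- ===== Notes on version B (the rewrite author's own statement) =====
-- stated objective: alternative
-- what changed: B replaces A's line-by-line in_section/break state machine with a parse-then-select decomposition: it parses the report once into an ordered list of (header, body) sections, finds the first section whose header matches a keyword, and collects the bodies of the contiguous run of matching sections; the partial-match scan becomes a first-match lookup (next/find?).
import Mathlib
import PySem

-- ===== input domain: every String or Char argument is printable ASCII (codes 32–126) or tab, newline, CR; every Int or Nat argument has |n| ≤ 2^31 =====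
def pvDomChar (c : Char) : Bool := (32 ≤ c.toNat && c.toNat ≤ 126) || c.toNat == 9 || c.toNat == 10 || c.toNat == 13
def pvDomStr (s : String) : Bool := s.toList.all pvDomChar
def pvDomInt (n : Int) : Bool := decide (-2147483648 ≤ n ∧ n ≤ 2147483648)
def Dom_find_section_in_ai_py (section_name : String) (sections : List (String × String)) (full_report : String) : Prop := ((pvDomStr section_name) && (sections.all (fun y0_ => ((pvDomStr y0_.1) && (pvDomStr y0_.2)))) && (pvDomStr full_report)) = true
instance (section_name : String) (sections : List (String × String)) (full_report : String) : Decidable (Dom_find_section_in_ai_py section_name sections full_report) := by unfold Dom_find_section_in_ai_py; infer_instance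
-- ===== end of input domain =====

-- B re-implements the keyword phase by parsing the report into (header, body) sections once,
-- then locating the first matching section and its contiguous matching run (same results, different decomposition).

-- ===== PORT A =====

-- A's partial-match loop: first item whose lowered key contains / is contained in the lowered name
def pvA_partial (snl : String) : List (String × String) → Option String
  | [] => none
  | (k, v) :: rest =>
    if PySem.Str.isIn snl (PySem.Str.lower k) || PySem.Str.isIn (PySem.Str.lower k) snl then some v
    else pvA_partial snl rest

-- A's line state machine: (in_section, section_content accumulator), with break on a non-matching header
def pvA_loop (hdr mtch : String → Bool) : List String → Bool → List String → List String
  | [], _, acc => acc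
  | l :: rest, ins, acc =>
    if hdr l then
      if mtch l then pvA_loop hdr mtch rest true acc
      else if ins then acc
      else pvA_loop hdr mtch rest false acc
    else if ins then pvA_loop hdr mtch rest ins (acc ++ [l])
    else pvA_loop hdr mtch rest ins acc

def find_section_in_ai_py (section_name : String) (sections : List (String × String)) (full_report : String) : String :=
  match (PySem.Dict.mk sections).get? section_name with
  | some v => v
  | none =>
    match pvA_partial (PySem.Str.lower section_name) sections with
    | some v => v
    | none =>
      let keywords := PySem.Str.split₀ (PySem.Str.lower section_name)
      let lines := ((PySem.Str.split? full_report "\n").getD [])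
      let sc := pvA_loop (fun l => PySem.Str.startswith l "## ")
        (fun l => keywords.any (fun k => PySem.Str.isIn k (PySem.Str.lower l)))
        lines false []
      if sc.isEmpty then "" else PySem.Str.strip (PySem.Str.join "\n" sc)

-- ===== PORT B =====

-- one fold step of B's parser: state = (finished sections, current (header, body) if any)
def pvB_step (hdr : String → Bool)
    (st : List (String × List String) × Option (String × List String)) (line : String) :
    List (String × List String) × Option (String × List String) :=
  if hdr line then
    (match st.2 with
     | some c => st.1 ++ [c]
     | none => st.1, some (line, []))
  else
    match st.2 with
    | some c => (st.1, some (c.1, c.2 ++ [line]))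
    | none => st

def pvB_finish (st : List (String × List String) × Option (String × List String)) :
    List (String × List String) :=
  match st.2 with
  | some c => st.1 ++ [c]
  | none => st.1

def pvB_parse (hdr : String → Bool) (lines : List String) : List (String × List String) :=
  pvB_finish (lines.foldl (pvB_step hdr) ([], none))

-- B's 'for h, b in secs[idx:]: if not matches(h): break; collected.extend(b)'
def pvB_takeRun (mtch : String → Bool) : List (String × List String) → List String
  | [] => []
  | (h, b) :: rest => if mtch h then b ++ pvB_takeRun mtch rest else []

def find_section_in_ai_py_alt (section_name : String) (sections : List (String × String)) (full_report : String) : String :=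
  match (PySem.Dict.mk sections).get? section_name with
  | some v => v
  | none =>
    let snl := PySem.Str.lower section_name
    match sections.find? (fun p => PySem.Str.isIn snl (PySem.Str.lower p.1) || PySem.Str.isIn (PySem.Str.lower p.1) snl) with
    | some p => p.2
    | none =>
      let keywords := PySem.Str.split₀ snl
      let mtch : String → Bool := fun h => keywords.any (fun k => PySem.Str.isIn k (PySem.Str.lower h))
      let secs := pvB_parse (fun l => PySem.Str.startswith l "## ") (((PySem.Str.split? full_report "\n").getD []))
      match secs.findIdx? (fun p => mtch p.1) with
      | none => ""
      | some i => PySem.Str.strip (PySem.Str.join "\n" (pvB_takeRun mtch (secs.drop i)))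

-- ===== PRECONDITION & SPEC =====
def Spec_find_section_in_ai_py (section_name : String) (sections : List (String × String)) (full_report : String) (out : String) : Prop := out = find_section_in_ai_py_alt section_name sections full_report
instance (section_name : String) (sections : List (String × String)) (full_report : String) (out : String) : Decidable (Spec_find_section_in_ai_py section_name sections full_report out) := by unfold Spec_find_section_in_ai_py; infer_instance

-- ===== CLAIM (what is proved, stated in full; the proofs are below) =====
def Claim_equal_find_section_in_ai_py : Prop := ∀ (section_name : String) (sections : List (String × String)) (full_report : String), Dom_find_section_in_ai_py section_name sections full_report → Spec_find_section_in_ai_py section_name sections full_report (find_section_in_ai_py section_name sections full_report)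

-- ===== LEMMAS AND PROOFS =====

-- recursive specification of B's fold-based parser
def pvR_parse (hdr : String → Bool) : List String → List (String × List String)
  | [] => []
  | l :: rest =>
    if hdr l then
      (l, rest.takeWhile (fun x => !hdr x)) :: pvR_parse hdr (rest.dropWhile (fun x => !hdr x))
    else pvR_parse hdr rest
termination_by lines => lines.length
decreasing_by
  · simpa using Nat.lt_succ_of_le (rest.length_dropWhile_le _)
  · simp

-- A's collected content, section-wise
def pvR_collect (mtch : String → Bool) : List (String × List String) → List String
  | [] => []
  | (h, b) :: rest => if mtch h then b ++ pvB_takeRun mtch rest else pvR_collect mtch rest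

theorem pvB_fold_some (hdr : String → Bool) (lines : List String)
    (secs : List (String × List String)) (h : String) (b : List String) :
    pvB_finish (lines.foldl (pvB_step hdr) (secs, some (h, b))) =
      secs ++ [(h, b ++ lines.takeWhile (fun x => !hdr x))] ++
        pvR_parse hdr (lines.dropWhile (fun x => !hdr x)) := by
  induction lines generalizing secs h b with
  | nil => simp [pvB_finish, pvR_parse]
  | cons l rest ih =>
    by_cases hl : hdr l = true
    · simp [List.foldl_cons, pvB_step, hl, ih, pvR_parse]
    · rw [List.takeWhile_cons_of_pos (by simp [hl]), List.dropWhile_cons_of_pos (by simp [hl])]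
      simp only [List.foldl_cons, pvB_step, hl, Bool.false_eq_true, if_false]
      rw [ih]
      simp

theorem pvB_fold_none (hdr : String → Bool) (lines : List String)
    (secs : List (String × List String)) :
    pvB_finish (lines.foldl (pvB_step hdr) (secs, none)) = secs ++ pvR_parse hdr lines := by
  induction lines generalizing secs with
  | nil => simp [pvB_finish, pvR_parse]
  | cons l rest ih =>
    by_cases hl : hdr l = true
    · simp [List.foldl_cons, pvB_step, hl, pvB_fold_some, pvR_parse]
    · simp [List.foldl_cons, pvB_step, hl, ih, pvR_parse]

theorem pvB_parse_eq (hdr : String → Bool) (lines : List String) :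
    pvB_parse hdr lines = pvR_parse hdr lines := by
  simpa [pvB_parse] using pvB_fold_none hdr lines []

-- B's findIdx?/drop/take-run pipeline equals the section-wise collection
theorem pvB_pipeline_eq (mtch : String → Bool) (secs : List (String × List String)) :
    (match secs.findIdx? (fun p => mtch p.1) with
     | none => []
     | some i => pvB_takeRun mtch (secs.drop i)) = pvR_collect mtch secs := by
  induction secs with
  | nil => simp [pvR_collect]
  | cons p rest ih =>
    obtain ⟨h, b⟩ := p
    by_cases hm : mtch h = true
    · simp [List.findIdx?_cons, hm, pvB_takeRun, pvR_collect]
    · simp only [List.findIdx?_cons, hm, pvR_collect, Bool.false_eq_true,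
        not_false_eq_true, if_neg]
      rw [← ih]
      cases hfi : rest.findIdx? (fun p => mtch p.1) with
      | none => simp
      | some i => simp

-- the accumulator of A's loop factors out
theorem pvA_loop_acc (hdr mtch : String → Bool) (lines : List String) (ins : Bool) (acc : List String) :
    pvA_loop hdr mtch lines ins acc = acc ++ pvA_loop hdr mtch lines ins [] := by
  induction lines generalizing ins acc with
  | nil => simp [pvA_loop]
  | cons l rest ih =>
    by_cases hl : hdr l = true
    · by_cases hm : mtch l = true
      · simp only [pvA_loop]
        rw [if_pos hl, if_pos hl, if_pos hm, if_pos hm]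
        exact ih true acc
      · cases ins <;> simp [pvA_loop, hl, hm]
        exact ih false acc
    · cases ins with
      | false => simp [pvA_loop, hl]; exact ih false acc
      | true =>
        simp only [pvA_loop, hl, Bool.false_eq_true, if_false]
        rw [ih true (acc ++ [l]), ih true ([] ++ [l])]
        simp
    
-- non-header lines are skipped while not in a section
theorem pvA_loop_skip (hdr mtch : String → Bool) (body rest : List String)
    (hb : ∀ l ∈ body, hdr l = false) :
    pvA_loop hdr mtch (body ++ rest) false [] = pvA_loop hdr mtch rest false [] := by
  induction body with
  | nil => simp
  | cons l tl ih =>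
    have hl := hb l (by simp)
    simp only [List.cons_append, pvA_loop, hl, Bool.false_eq_true, if_false]
    exact ih (fun x hx => hb x (by simp [hx]))

-- non-header lines are collected while in a section
theorem pvA_loop_collect (hdr mtch : String → Bool) (body rest : List String)
    (hb : ∀ l ∈ body, hdr l = false) :
    pvA_loop hdr mtch (body ++ rest) true [] = body ++ pvA_loop hdr mtch rest true [] := by
  induction body with
  | nil => simp
  | cons l tl ih =>
    have hl := hb l (by simp)
    simp only [List.cons_append, pvA_loop, hl, Bool.false_eq_true, if_false]
    rw [pvA_loop_acc]
    simp only [List.nil_append]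
    rw [ih (fun x hx => hb x (by simp [hx]))]
    simp

-- in-section run: A's loop from state true equals B's take-run over the parsed sections,
-- provided the line list is empty or starts with a header
theorem pvA_loop_run (hdr mtch : String → Bool) (lines : List String)
    (hh : ∀ x, lines.head? = some x → hdr x = true) :
    pvA_loop hdr mtch lines true [] = pvB_takeRun mtch (pvR_parse hdr lines) := by
  induction hn : lines.length using Nat.strong_induction_on generalizing lines with
  | _ n ih =>
    match lines with
    | [] => simp [pvA_loop, pvR_parse, pvB_takeRun]
    | l :: rest =>
      have hl : hdr l = true := hh l rfl
      by_cases hm : mtch l = true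
      · have hsplit := rest.takeWhile_append_dropWhile (p := fun x => !hdr x)
        have hlen : (rest.dropWhile (fun x => !hdr x)).length < n := by
          subst hn; simpa using Nat.lt_succ_of_le (rest.length_dropWhile_le _)
        have htw : ∀ x ∈ rest.takeWhile (fun x => !hdr x), hdr x = false := by
          intro x hx
          have := List.mem_takeWhile_imp hx
          simpa using this
        have hhd : ∀ x, (rest.dropWhile (fun x => !hdr x)).head? = some x → hdr x = true := by
          intro x hx
          have := List.head?_dropWhile_not (p := fun x => !hdr x) rest
          rw [hx] at this
          simpa using this
        have hstep : pvA_loop hdr mtch rest true [] =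
            rest.takeWhile (fun x => !hdr x) ++
              pvA_loop hdr mtch (rest.dropWhile (fun x => !hdr x)) true [] := by
          conv_lhs => rw [← hsplit]
          exact pvA_loop_collect hdr mtch _ _ htw
        simp only [pvA_loop, hl, hm, if_true, pvR_parse, pvB_takeRun]
        rw [hstep, ih _ hlen _ hhd rfl]
      · simp [pvA_loop, hl, hm, pvR_parse, pvB_takeRun]

-- the whole keyword phase: A's state machine equals B's parse-and-collect
theorem pvA_loop_eq_collect (hdr mtch : String → Bool) (lines : List String) :
    pvA_loop hdr mtch lines false [] = pvR_collect mtch (pvR_parse hdr lines) := by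
  induction hn : lines.length using Nat.strong_induction_on generalizing lines with
  | _ n ih =>
    match lines with
    | [] => simp [pvA_loop, pvR_parse, pvR_collect]
    | l :: rest =>
      by_cases hl : hdr l = true
      · have hsplit := rest.takeWhile_append_dropWhile (p := fun x => !hdr x)
        have hlen : (rest.dropWhile (fun x => !hdr x)).length < n := by
          subst hn; simpa using Nat.lt_succ_of_le (rest.length_dropWhile_le _)
        have htw : ∀ x ∈ rest.takeWhile (fun x => !hdr x), hdr x = false := by
          intro x hx
          have := List.mem_takeWhile_imp hx
          simpa using this
        have hhd : ∀ x, (rest.dropWhile (fun x => !hdr x)).head? = some x → hdr x = true := by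
          intro x hx
          have := List.head?_dropWhile_not (p := fun x => !hdr x) rest
          rw [hx] at this
          simpa using this
        by_cases hm : mtch l = true
        · have hstep : pvA_loop hdr mtch rest true [] =
              rest.takeWhile (fun x => !hdr x) ++
                pvA_loop hdr mtch (rest.dropWhile (fun x => !hdr x)) true [] := by
            conv_lhs => rw [← hsplit]
            exact pvA_loop_collect hdr mtch _ _ htw
          simp only [pvA_loop, hl, hm, if_true, pvR_parse, pvR_collect]
          rw [hstep, pvA_loop_run hdr mtch _ hhd]
        · simp only [pvA_loop, hl, hm, Bool.false_eq_true, if_false, if_true,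
            pvR_parse, pvR_collect]
          have hstep : pvA_loop hdr mtch rest false [] =
              pvA_loop hdr mtch (rest.dropWhile (fun x => !hdr x)) false [] := by
            conv_lhs => rw [← hsplit]
            exact pvA_loop_skip hdr mtch _ _ htw
          rw [hstep]
          exact ih _ hlen _ rfl
      · simp only [pvA_loop, hl, Bool.false_eq_true, if_false, pvR_parse]
        exact ih _ (by subst hn; simp) _ rfl

-- A's partial-match loop is a find?
theorem pvA_partial_eq (snl : String) (sections : List (String × String)) :
    pvA_partial snl sections =
      (sections.find? (fun p => PySem.Str.isIn snl (PySem.Str.lower p.1) || PySem.Str.isIn (PySem.Str.lower p.1) snl)).map (·.2) := by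
  induction sections with
  | nil => simp [pvA_partial]
  | cons p rest ih =>
    obtain ⟨k, v⟩ := p
    cases hp : (PySem.Str.isIn snl (PySem.Str.lower k) || PySem.Str.isIn (PySem.Str.lower k) snl) with
    | true =>
      rw [pvA_partial, if_pos hp, List.find?_cons]
      simp only [hp]
      rfl
    | false =>
      have hp' : ¬ (PySem.Str.isIn snl (PySem.Str.lower k) || PySem.Str.isIn (PySem.Str.lower k) snl) = true := by
        rw [hp]; exact Bool.false_ne_true
      rw [pvA_partial, if_neg hp', List.find?_cons]
      simp only [hp]
      exact ih

-- B's keyword phase as a string equals A's emptiness-guarded join-and-strip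
theorem pvB_pipeline_str (mtch : String → Bool) (secs : List (String × List String)) :
    (match secs.findIdx? (fun p => mtch p.1) with
     | none => ""
     | some i => PySem.Str.strip (PySem.Str.join "\n" (pvB_takeRun mtch (secs.drop i)))) =
      (if (pvR_collect mtch secs).isEmpty then "" else
        PySem.Str.strip (PySem.Str.join "\n" (pvR_collect mtch secs))) := by
  have hpipe := pvB_pipeline_eq mtch secs
  cases hfi : secs.findIdx? (fun p => mtch p.1) with
  | none =>
    rw [hfi] at hpipe
    simp [← hpipe]
  | some i =>
    rw [hfi] at hpipe
    simp only at hpipe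
    simp only [← hpipe]
    generalize pvB_takeRun mtch (secs.drop i) = c
    cases c with
    | nil => decide
    | cons x xs => simp

-- ===== VERDICT (by name: the statement is the Claim_ definition above) =====
theorem find_section_in_ai_py_spec : Claim_equal_find_section_in_ai_py := by
  intro section_name sections full_report _
  unfold Spec_find_section_in_ai_py find_section_in_ai_py find_section_in_ai_py_alt
  cases hget : (PySem.Dict.mk sections).get? section_name with
  | some v => simp
  | none =>
    simp only []
    rw [pvA_partial_eq]
    cases hfind : sections.find? (fun p => PySem.Str.isIn (PySem.Str.lower section_name) (PySem.Str.lower p.1) || PySem.Str.isIn (PySem.Str.lower p.1) (PySem.Str.lower section_name)) with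
    | some p => simp
    | none =>
      simp only [Option.map_none]
      rw [pvB_parse_eq, pvA_loop_eq_collect]
      exact (pvB_pipeline_str _ _).symm
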